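-- pv_equiv track=rewrite | github.com/UPVEX/Every_day_python | break_camel_case.py | break_camel_case
-- ===== SOURCE A (Python) =====
-- def break_camel_case(s):
--     result = ''
--
--     for i, char in enumerate(s):
--
--         if char.isupper() and i > 0:
--             result += ' ' + char
--
--         else:
--             result += char
--
--     return result
-- ===== SOURCE B (Python) =====
-- def break_camel_case(s):
--     bounds = [i for i in range(1, len(s)) if s[i].isupper()]
--     starts = [0] + bounds
--     stops = bounds + [len(s)]
--     return ' '.join(s[a:b] for a, b in zip(starts, stops))
-- ===== Notes on version B (the rewrite author's own statement) =====
-- stated objective: alternative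
-- what changed: A builds the result one character at a time inside an enumerate loop; B first collects the boundary indices where an uppercase letter occurs after position 0, then slices the string between consecutive boundaries and joins the slices with a single space.
import Mathlib
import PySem

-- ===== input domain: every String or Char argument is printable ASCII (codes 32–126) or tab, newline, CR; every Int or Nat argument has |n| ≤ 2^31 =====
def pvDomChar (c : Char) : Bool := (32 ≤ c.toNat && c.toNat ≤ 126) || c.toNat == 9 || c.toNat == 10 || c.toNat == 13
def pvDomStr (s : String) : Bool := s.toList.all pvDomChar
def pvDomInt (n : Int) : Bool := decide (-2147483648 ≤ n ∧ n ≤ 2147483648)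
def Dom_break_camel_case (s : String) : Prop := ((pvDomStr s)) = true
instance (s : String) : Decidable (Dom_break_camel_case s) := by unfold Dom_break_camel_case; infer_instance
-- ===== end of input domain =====

-- B collects boundary indices then slices and joins; A appends char by char. Equivalence on all inputs.

-- ===== PORT A =====
def break_camel_case (s : String) : String :=
  String.ofList ((PySem.List.enumerate s.toList 0).foldl
    (fun result p =>
      if PySem.Str.isupper p.2 && decide (0 < p.1) then result ++ [' ', p.2]
      else result ++ [p.2]) [])

-- ===== PORT B =====
def break_camel_case_alt (s : String) : String :=
  let cs := s.toList
  let bounds : List Int := (PySem.List.pyRange 1 (PySem.Str.len s) 1).filter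
    (fun i => ((PySem.List.pyGet? cs i).map PySem.Str.isupper).getD false)
  let starts : List Int := 0 :: bounds
  let stops : List Int := bounds ++ [PySem.Str.len s]
  String.ofList (PySem.Chars.join [' ']
    ((starts.zip stops).map (fun p => PySem.List.slice cs (some p.1) (some p.2))))

-- ===== PRECONDITION & SPEC =====
def Spec_break_camel_case (s : String) (out : String) : Prop := out = break_camel_case_alt s
instance (s : String) (out : String) : Decidable (Spec_break_camel_case s out) := by unfold Spec_break_camel_case; infer_instance

-- ===== CLAIM (what is proved, stated in full; the proofs are below) =====
def Claim_equal_break_camel_case : Prop := ∀ (s : String), Dom_break_camel_case s → Spec_break_camel_case s (break_camel_case s)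


-- ===== LEMMAS AND PROOFS =====

/-- Default-read character at index `i`. -/
def cD (cs : List Char) (i : Nat) : Char := cs.getD i ' '

/-- Is the character at `i` uppercase. -/
def upN (cs : List Char) (i : Nat) : Bool := PySem.Str.isupper (cD cs i)

/-- Emitted chunk for index `i` in the segment starting at `a`. -/
def eAbs (cs : List Char) (a i : Nat) : List Char :=
  if upN cs i && decide (a < i) then [' ', cD cs i] else [cD cs i]

/-- Nat-level join of the slices between consecutive boundaries. -/
def Jn (cs : List Char) (n : Nat) : Nat → List Nat → List Char
  | a, [] => (cs.drop a).take (n - a)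
  | a, b :: bs => (cs.drop a).take (b - a) ++ ' ' :: Jn cs n b bs

lemma dropTake (cs : List Char) : ∀ (m a : Nat), a + m ≤ cs.length →
    (cs.drop a).take m = (List.range' a m).map (cD cs) := by
  intro m
  induction m with
  | zero => intro a h; simp
  | succ m ih =>
    intro a h
    have ha : a < cs.length := by omega
    rw [List.drop_eq_getElem_cons ha, List.range'_succ]
    simp only [List.take_succ_cons, List.map_cons]
    rw [ih (a+1) (by omega)]
    simp [cD, List.getD, List.getElem?_eq_getElem ha]

lemma jnCons (cs : List Char) (a : Nat) (bs : List Nat) (ha : a < cs.length)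
    (hbs : ∀ b ∈ bs, a < b) :
    Jn cs cs.length a bs = cD cs a :: Jn cs cs.length (a+1) bs := by
  cases bs with
  | nil =>
    simp only [Jn]
    have : cs.length - a = (cs.length - (a+1)) + 1 := by omega
    rw [this, List.drop_eq_getElem_cons ha, List.take_succ_cons]
    simp only [cD, List.getD, List.getElem?_eq_getElem ha, Option.getD_some]
  | cons b bs =>
    have hab : a < b := hbs b (by simp)
    simp only [Jn]
    have : b - a = (b - (a+1)) + 1 := by omega
    rw [this, List.drop_eq_getElem_cons ha, List.take_succ_cons, List.cons_append]
    simp only [cD, List.getD, List.getElem?_eq_getElem ha, Option.getD_some]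

lemma flatMap_congr_range' (s m : Nat) (f g : Nat → List Char)
    (h : ∀ i, s ≤ i → i < s + m → f i = g i) :
    (List.range' s m).flatMap f = (List.range' s m).flatMap g := by
  simp only [List.flatMap_def]
  congr 1
  apply List.map_congr_left
  intro i hi
  rw [List.mem_range'_1] at hi
  exact h i hi.1 hi.2

lemma mainJn (cs : List Char) : ∀ (k a : Nat), a + 1 + k = cs.length →
    Jn cs cs.length a ((List.range' (a+1) k).filter (upN cs))
      = (List.range' a (k+1)).flatMap (eAbs cs a) := by
  intro k
  induction k with
  | zero =>
    intro a h
    simp only [List.range'_zero, List.filter_nil, Jn]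
    rw [dropTake cs (cs.length - a) a (by omega)]
    have : cs.length - a = 1 := by omega
    rw [this]
    simp [eAbs]
  | succ k ih =>
    intro a h
    rw [List.range'_succ]
    have hsplit : (List.range' a (k+1+1)).flatMap (eAbs cs a)
        = eAbs cs a a ++ (List.range' (a+1) (k+1)).flatMap (eAbs cs a) := by
      rw [List.range'_succ]; simp
    rw [hsplit]
    have hAsame : (List.range' (a+1) (k+1)).flatMap (eAbs cs a)
        = eAbs cs a (a+1) ++ (List.range' (a+2) k).flatMap (eAbs cs a) := by
      rw [List.range'_succ]; simp
    have hcongr : (List.range' (a+2) k).flatMap (eAbs cs a)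
        = (List.range' (a+2) k).flatMap (eAbs cs (a+1)) := by
      apply flatMap_congr_range'
      intro i h1 _
      simp only [eAbs]
      have h1' : a < i := by omega
      have h2' : a + 1 < i := by omega
      simp [h1', h2']
    have hIH := ih (a+1) (by omega)
    have hIHsplit : (List.range' (a+1) (k+1)).flatMap (eAbs cs (a+1))
        = eAbs cs (a+1) (a+1) ++ (List.range' (a+2) k).flatMap (eAbs cs (a+1)) := by
      rw [List.range'_succ]; simp
    by_cases hup : upN cs (a+1) = true
    · rw [List.filter_cons_of_pos hup]
      simp only [Jn]
      rw [dropTake cs ((a+1) - a) a (by omega)]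
      have h1 : (a+1) - a = 1 := by omega
      rw [h1]
      simp only [List.range'_one, List.map_cons, List.map_nil]
      rw [hIH, hIHsplit]
      have hea : eAbs cs a a = [cD cs a] := by simp [eAbs]
      have heup : eAbs cs a (a+1) = [' ', cD cs (a+1)] := by
        simp [eAbs, hup]
      have heup1 : eAbs cs (a+1) (a+1) = [cD cs (a+1)] := by simp [eAbs]
      rw [hAsame, hcongr, hea, heup, heup1]
      simp
    · have hup' : upN cs (a+1) = false := by simpa using hup
      rw [List.filter_cons_of_neg (by simp [hup'])]
      have hball : ∀ b ∈ (List.range' (a+2) k).filter (upN cs), a < b := by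
        intro b hb
        have := List.mem_range'_1.mp (List.mem_of_mem_filter hb)
        omega
      rw [jnCons cs a ((List.range' (a+2) k).filter (upN cs)) (by omega) hball]
      rw [hIH, hIHsplit]
      have hea : eAbs cs a a = [cD cs a] := by simp [eAbs]
      have heup : eAbs cs a (a+1) = [cD cs (a+1)] := by simp [eAbs, hup']
      have heup1 : eAbs cs (a+1) (a+1) = [cD cs (a+1)] := by simp [eAbs]
      rw [hAsame, hcongr, hea, heup, heup1]
      simp

lemma connJoin (cs : List Char) : ∀ (bs : List Nat) (a : Nat),
    PySem.Chars.join [' ']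
      ((((a : Int) :: bs.map Int.ofNat).zip (bs.map Int.ofNat ++ [(cs.length : Int)])).map
        (fun p => PySem.List.slice cs (some p.1) (some p.2)))
      = Jn cs cs.length a bs := by
  intro bs
  induction bs with
  | nil =>
    intro a
    simp only [List.map_nil, List.nil_append, List.zip_cons_cons, List.zip_nil_right,
      List.map_cons]
    rw [PySem.Chars.join_singleton, PySem.List.slice_natCast]
    rfl
  | cons b bs ih =>
    intro a
    have hstep : (((a : Int) :: (b :: bs).map Int.ofNat).zip ((b :: bs).map Int.ofNat ++ [(cs.length : Int)]))
        = ((a : Int), (b : Int)) :: (((b : Int) :: bs.map Int.ofNat).zip (bs.map Int.ofNat ++ [(cs.length : Int)])) := by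
      simp
    rw [hstep, List.map_cons]
    cases bs with
    | nil =>
      simp only [List.map_nil, List.nil_append, List.zip_cons_cons, List.zip_nil_right,
        List.map_cons]
      rw [PySem.Chars.join_cons_cons, PySem.Chars.join_singleton,
        PySem.List.slice_natCast, PySem.List.slice_natCast]
      simp [Jn]
    | cons c cs2 =>
      have hstep2 : (((b : Int) :: (c :: cs2).map Int.ofNat).zip ((c :: cs2).map Int.ofNat ++ [(cs.length : Int)]))
          = ((b : Int), (c : Int)) :: (((c : Int) :: cs2.map Int.ofNat).zip (cs2.map Int.ofNat ++ [(cs.length : Int)])) := by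
        simp
      rw [hstep2, List.map_cons, PySem.Chars.join_cons_cons]
      have h2 := ih b
      rw [hstep2, List.map_cons] at h2
      simp only at h2 ⊢
      rw [h2]
      simp [Jn, PySem.List.slice_natCast, List.append_assoc]

lemma aflat (cs : List Char) : ∀ (cs' : List Char) (j : Nat), cs' = cs.drop j →
    (PySem.List.enumerate cs' (j : Int)).flatMap
      (fun p => if PySem.Str.isupper p.2 && decide (0 < p.1) then [' ', p.2] else [p.2])
    = (List.range' j cs'.length).flatMap (eAbs cs 0) := by
  intro cs'
  induction cs' with
  | nil => intro j _; simp [PySem.List.enumerate]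
  | cons c t ih =>
    intro j h
    have hj : j < cs.length := by
      have hl := congrArg List.length h
      simp [List.length_drop] at hl
      omega
    have hcq : cs[j]? = some c := by
      have h0 : (cs.drop j)[0]? = some c := by rw [← h]; simp
      rw [List.getElem?_drop] at h0
      simpa using h0
    have hc : cD cs j = c := by simp [cD, List.getD, hcq]
    rw [PySem.List.enumerate_cons]
    simp only [List.flatMap_cons, List.length_cons, List.range'_succ]
    have ht : t = cs.drop (j+1) := by
      have := congrArg List.tail h
      simpa [List.tail_drop] using this
    have hrec := ih (j+1) ht
    have hcast : ((j : Int) + 1) = ((j+1 : Nat) : Int) := by push_cast; ring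
    rw [hcast, hrec]
    congr 1
    simp [eAbs, upN, hc]

lemma afold (s : String) :
    break_camel_case s = String.ofList ((PySem.List.enumerate s.toList 0).flatMap
      (fun p => if PySem.Str.isupper p.2 && decide (0 < p.1) then [' ', p.2] else [p.2])) := by
  unfold break_camel_case
  congr 1
  have hfun : (fun (result : List Char) (p : Int × Char) =>
      if PySem.Str.isupper p.2 && decide (0 < p.1) then result ++ [' ', p.2] else result ++ [p.2])
      = (fun (result : List Char) (p : Int × Char) =>
          result ++ (if PySem.Str.isupper p.2 && decide (0 < p.1) then [' ', p.2] else [p.2])) := by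
    funext r p
    split <;> rfl
  rw [hfun, PySem.List.foldl_append_eq_flatMap]
  simp

lemma bbounds (cs : List Char) :
    (PySem.List.pyRange 1 (cs.length : Int) 1).filter
      (fun i => ((PySem.List.pyGet? cs i).map PySem.Str.isupper).getD false)
    = ((List.range' 1 (cs.length - 1)).filter (upN cs)).map Int.ofNat := by
  rw [PySem.List.pyRange_one]
  have h1 : ((cs.length : Int) - 1).toNat = cs.length - 1 := by omega
  rw [h1, List.range'_eq_map_range, List.filter_map, List.filter_map, List.map_map]
  have hfn : (fun k : Nat => (1 : Int) + (k : Int)) = (Int.ofNat ∘ fun k => 1 + k) := by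
    funext k
    simp [Int.ofNat_eq_natCast]
  rw [hfn]
  congr 1
  apply List.filter_congr
  intro k hk
  have hk' : 1 + k < cs.length := by
    have := List.mem_range.mp hk
    omega
  simp only [Function.comp, Int.ofNat_eq_natCast, PySem.List.pyGet?_natCast,
    List.getElem?_eq_getElem hk', Option.map_some, Option.getD_some]
  simp [upN, cD, List.getD, List.getElem?_eq_getElem hk']

lemma main_eq (s : String) : break_camel_case s = break_camel_case_alt s := by
  rw [afold]
  unfold break_camel_case_alt
  simp only [PySem.Str.len]
  by_cases hn : s.toList.length = 0
  · rw [List.length_eq_zero_iff] at hn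
    simp [hn, PySem.List.pyRange_one_eq_nil,
      PySem.Chars.join_singleton, PySem.List.slice]
  · have hA := aflat s.toList s.toList 0 (by simp)
    simp only [Nat.cast_zero] at hA
    rw [hA, bbounds]
    have h0 : (0 : Int) = ((0 : Nat) : Int) := rfl
    rw [h0, connJoin s.toList ((List.range' 1 (s.toList.length - 1)).filter (upN s.toList)) 0]
    rw [mainJn s.toList (s.toList.length - 1) 0 (by omega)]
    have : s.toList.length - 1 + 1 = s.toList.length := by omega
    rw [this]

-- ===== VERDICT (by name: the statement is the Claim_ definition above) =====
theorem break_camel_case_spec : Claim_equal_break_camel_case := by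
  intro s _
  unfold Spec_break_camel_case
  exact main_eq s
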